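-- pv_equiv track=rewrite | github.com/AbrorjonDev/finance_bot | bot/database.py | get_all_payments
-- ===== SOURCE A (Python) =====
-- def get_intToSTR(summa):
--     if type(summa)!=int:
--         return summa
--     summa_str = str(summa)
--     indexi = 0
--     for i in range(len(summa_str)):
--         if summa_str[i]=='-':
--             indexi = i
--             summa_str = summa_str[i+1:]
--     counter=0
--     for i in range(len(summa_str), 0, -1):
--
--         if counter>2:
--             summa_str = summa_str[0:i]+','+summa_str[i:]
--             counter=0
--         counter += 1
--     if "-" in str(summa):
--         summa_str = '-'+summa_str
--     return summa_str
--
-- def get_all_payments(payments, lang=None):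
--     text = ''
--     if len(payments)==0:
--         if lang=='ru':
--             return 'Платежек пока нет..'
--         if lang=='uz':
--             return 'To\'lovlar yo\'q..'
--         else:
--             return 'No payments yet..'
--     for pay in payments:
--         text+=f'  {pay[0]}                               {get_intToSTR(pay[1])}\n'
--     return text
-- ===== SOURCE B (Python) =====
-- def get_intToSTR(summa):
--     if type(summa) != int:
--         return summa
--     return format(summa, ',')
--
--
-- def get_all_payments(payments, lang=None):
--     if not payments:
--         if lang == 'ru':
--             return 'Платежек пока нет..'
--         if lang == 'uz':
--             return "To'lovlar yo'q.."
--         return 'No payments yet..'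
--     return ''.join(
--         f'  {name}                               {get_intToSTR(summa)}\n'
--         for name, summa in payments
--     )
-- ===== Notes on version B (the rewrite author's own statement) =====
-- stated objective: idiomatic
-- what changed: get_intToSTR's index-scan minus-stripping and right-to-left comma-insertion loops are replaced by the builtin format(summa, ',') grouping, and the line accumulation by ''.join over a generator; behaviour is identical on all payment lists whose amounts are nonnegative.
import Mathlib
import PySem

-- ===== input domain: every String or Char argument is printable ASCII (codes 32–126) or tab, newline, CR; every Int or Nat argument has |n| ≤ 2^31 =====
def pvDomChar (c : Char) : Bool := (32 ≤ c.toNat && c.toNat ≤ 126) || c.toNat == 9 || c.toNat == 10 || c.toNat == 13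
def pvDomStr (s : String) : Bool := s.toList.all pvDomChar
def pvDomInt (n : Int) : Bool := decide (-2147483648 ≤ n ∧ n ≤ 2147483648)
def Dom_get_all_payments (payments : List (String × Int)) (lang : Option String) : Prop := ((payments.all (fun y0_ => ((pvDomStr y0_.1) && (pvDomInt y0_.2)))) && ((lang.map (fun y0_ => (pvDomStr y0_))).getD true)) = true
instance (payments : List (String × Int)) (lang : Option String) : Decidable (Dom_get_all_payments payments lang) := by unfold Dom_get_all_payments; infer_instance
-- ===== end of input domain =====

-- B replaces A's hand-rolled minus-stripping and right-to-left comma-insertion loops by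
-- builtin digit grouping (format(n, ',')) and a join over the formatted lines (idiomatic).

-- ===== PORT A =====
-- Python strings are carried as List Char (the PySem representation); String.mk wraps the result.

-- body of 'for i in range(len(summa_str)): if summa_str[i]=='-': summa_str = summa_str[i+1:]'
-- ('indexi' is dead state in A and is not carried)
def pvStripStep (s : List Char) (i : Int) : List Char :=
  match PySem.List.pyGet? s i with
  | some c => if c = '-' then PySem.List.slice s (some (i + 1)) none else s
  | none => s   -- Python raises IndexError here (reached only for negative summa; outside Pre_)

-- body of the comma loop: 'if counter>2: summa_str = summa_str[0:i]+','+summa_str[i:]; counter=0 / counter += 1'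
def pvCommaStep (st : List Char × Int) (i : Int) : List Char × Int :=
  if st.2 > 2 then
    (PySem.List.slice st.1 none (some i) ++ ',' :: PySem.List.slice st.1 (some i) none, (0 : Int) + 1)
  else (st.1, st.2 + 1)

def get_intToSTR (summa : Int) : List Char :=
  -- 'type(summa)!=int' is never true for an Int argument, so that branch is dead
  let s0 := PySem.Int.toChars summa
  let s1 := (PySem.List.pyRange 0 s0.length 1).foldl pvStripStep s0
  let s2 := ((PySem.List.pyRange s1.length 0 (-1)).foldl pvCommaStep (s1, 0)).1
  if '-' ∈ PySem.Int.toChars summa then '-' :: s2 else s2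

def get_all_payments (payments : List (String × Int)) (lang : Option String) : String :=
  if payments.length = 0 then
    if lang = some "ru" then "Платежек пока нет.."
    else if lang = some "uz" then "To'lovlar yo'q.."
    else "No payments yet.."
  else
    String.mk (payments.foldl
      (fun text pay =>
        text ++ (' ' :: ' ' :: pay.1.toList ++ List.replicate 31 ' ' ++ get_intToSTR pay.2 ++ ['\n']))
      [])

-- ===== PORT B =====

-- insert ',' after every 3 characters of the reversed digit list (the grouping of format(n, ','))
def pvGrpRev : List Char → List Char
  | a :: b :: c :: d :: rest => a :: b :: c :: ',' :: pvGrpRev (d :: rest)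
  | l => l

-- format(summa, ','): sign, then the digits of |summa| grouped in threes from the right
def pvFmtComma (n : Int) : List Char :=
  (if n < 0 then ['-'] else []) ++ (pvGrpRev (PySem.Int.toChars (n.natAbs : Int)).reverse).reverse

def get_all_payments_alt (payments : List (String × Int)) (lang : Option String) : String :=
  if payments = [] then
    if lang = some "ru" then "Платежек пока нет.."
    else if lang = some "uz" then "To'lovlar yo'q.."
    else "No payments yet.."
  else
    String.mk ((payments.map
      (fun pay => ' ' :: ' ' :: pay.1.toList ++ List.replicate 31 ' ' ++ pvFmtComma pay.2 ++ ['\n'])).flatten)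

-- ===== PRECONDITION & SPEC =====
-- Pre_ excludes exactly the inputs where A raises IndexError: a negative amount makes A's
-- minus-stripping loop index past the shortened string.
def Pre_get_all_payments (payments : List (String × Int)) (lang : Option String) : Prop :=
  ∀ pay ∈ payments, 0 ≤ pay.2
instance (payments : List (String × Int)) (lang : Option String) : Decidable (Pre_get_all_payments payments lang) := by unfold Pre_get_all_payments; infer_instance

def pvWitness_get_all_payments : (List (String × Int)) × Option String := ([("shop", 1234567)], none)

def Spec_get_all_payments (payments : List (String × Int)) (lang : Option String) (out : String) : Prop := out = get_all_payments_alt payments lang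
instance (payments : List (String × Int)) (lang : Option String) (out : String) : Decidable (Spec_get_all_payments payments lang out) := by unfold Spec_get_all_payments; infer_instance

-- ===== CLAIM (what is proved, stated in full; the proofs are below) =====
def Claim_equal_get_all_payments : Prop := ∀ (payments : List (String × Int)) (lang : Option String), Dom_get_all_payments payments lang → Pre_get_all_payments payments lang → Spec_get_all_payments payments lang (get_all_payments payments lang)

-- ===== LEMMAS AND PROOFS =====

-- the strip loop leaves a '-'-free string unchanged, whatever indices it visits
theorem pv_strip_noop (is : List Int) (s : List Char) (h : '-' ∉ s) :
    is.foldl pvStripStep s = s := by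
  induction is with
  | nil => rfl
  | cons i is ih =>
    have hstep : pvStripStep s i = s := by
      unfold pvStripStep
      cases hg : PySem.List.pyGet? s i with
      | none => rfl
      | some c =>
        have hc : c ∈ s := PySem.List.mem_of_pyGet?_eq_some s hg
        have : c ≠ '-' := fun he => h (he ▸ hc)
        simp [this]
    simp [List.foldl_cons, hstep, ih]

-- with counter budget c + m ≤ 3 the comma loop never inserts
theorem pv_no_insert (m : Nat) : ∀ (s : List Char) (c : Int), c + m ≤ 3 → 0 ≤ c →
    (PySem.List.pyRange (m : Int) 0 (-1)).foldl pvCommaStep (s, c) = (s, c + m) := by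
  induction m with
  | zero => intro s c _ _; simp [PySem.List.pyRange_neg_one_eq_nil]
  | succ k ih =>
    intro s c hle hc
    rw [PySem.List.pyRange_neg_one_cons (by exact_mod_cast Nat.succ_pos k)]
    have hstep : pvCommaStep (s, c) ((k : Int) + 1) = (s, c + 1) := by
      unfold pvCommaStep
      have : ¬ c > 2 := by omega
      simp [this]
    have hcast : ((k + 1 : Nat) : Int) - 1 = (k : Int) := by push_cast; ring
    push_cast
    rw [show ((k : Int) + 1 - 1) = (k : Int) by ring]
    simp only [List.foldl_cons]
    rw [show pvCommaStep (s, c) ((k : Int) + 1) = (s, c + 1) from hstep]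
    rw [ih s (c + 1) (by push_cast at hle ⊢; omega) (by omega)]
    simp only [Prod.mk.injEq, true_and]
    push_cast
    omega

-- inserts at positions ≤ m never touch an appended tail
theorem pv_frame (m : Nat) : ∀ (s t : List Char) (c : Int), m ≤ s.length →
    (PySem.List.pyRange (m : Int) 0 (-1)).foldl pvCommaStep (s ++ t, c)
      = (((PySem.List.pyRange (m : Int) 0 (-1)).foldl pvCommaStep (s, c)).1 ++ t,
         ((PySem.List.pyRange (m : Int) 0 (-1)).foldl pvCommaStep (s, c)).2) := by
  induction m with
  | zero => intro s t c _; simp [PySem.List.pyRange_neg_one_eq_nil]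
  | succ k ih =>
    intro s t c hm
    rw [PySem.List.pyRange_neg_one_cons (by exact_mod_cast Nat.succ_pos k)]
    push_cast
    rw [show ((k : Int) + 1 - 1) = (k : Int) by ring]
    simp only [List.foldl_cons]
    by_cases hcge : c > 2
    · have htake : PySem.List.slice (s ++ t) none (some ((k : Int) + 1)) = s.take (k + 1) := by
        rw [show ((k : Int) + 1) = ((k + 1 : Nat) : Int) by push_cast; ring,
          PySem.List.slice_to_natCast, List.take_append_of_le_length (by omega)]
      have hdrop : PySem.List.slice (s ++ t) (some ((k : Int) + 1)) none = s.drop (k + 1) ++ t := by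
        rw [show ((k : Int) + 1) = ((k + 1 : Nat) : Int) by push_cast; ring,
          PySem.List.slice_from_natCast, List.drop_append_of_le_length (by omega)]
      have htake' : PySem.List.slice s none (some ((k : Int) + 1)) = s.take (k + 1) := by
        rw [show ((k : Int) + 1) = ((k + 1 : Nat) : Int) by push_cast; ring,
          PySem.List.slice_to_natCast]
      have hdrop' : PySem.List.slice s (some ((k : Int) + 1)) none = s.drop (k + 1) := by
        rw [show ((k : Int) + 1) = ((k + 1 : Nat) : Int) by push_cast; ring,
          PySem.List.slice_from_natCast]
      rw [show pvCommaStep (s ++ t, c) ((k : Int) + 1)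
            = ((s.take (k + 1) ++ ',' :: s.drop (k + 1)) ++ t, (0 : Int) + 1) by
        unfold pvCommaStep; simp [hcge, htake, hdrop]]
      rw [show pvCommaStep (s, c) ((k : Int) + 1)
            = (s.take (k + 1) ++ ',' :: s.drop (k + 1), (0 : Int) + 1) by
        unfold pvCommaStep; simp [hcge, htake', hdrop']]
      exact ih _ t _ (by simp; omega)
    · rw [show pvCommaStep (s ++ t, c) ((k : Int) + 1) = (s ++ t, c + 1) by
        unfold pvCommaStep; simp [hcge]]
      rw [show pvCommaStep (s, c) ((k : Int) + 1) = (s, c + 1) by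
        unfold pvCommaStep; simp [hcge]]
      exact ih s t (c + 1) (by omega)

theorem pv_grpRev_short (l : List Char) (h : l.length ≤ 3) : pvGrpRev l = l := by
  match l with
  | [] => rfl
  | [a] => rfl
  | [a, b] => rfl
  | [a, b, c] => rfl
  | a :: b :: c :: d :: r => simp at h; omega

-- the comma loop computes exactly the reversed-chunking grouping
theorem pv_comma_eq (n : Nat) : ∀ (s : List Char), s.length = n →
    ((PySem.List.pyRange (s.length : Int) 0 (-1)).foldl pvCommaStep (s, 0)).1
      = (pvGrpRev s.reverse).reverse := by
  induction n using Nat.strong_induction_on with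
  | _ n ih =>
    intro s hs
    by_cases hsmall : n ≤ 3
    · rw [hs, pv_no_insert n s 0 (by omega) le_rfl]
      rw [pv_grpRev_short s.reverse (by simp [hs, hsmall])]
      simp
    · -- n ≥ 4; split s into u ++ v with v the last three characters
      obtain ⟨k, rfl⟩ : ∃ k, n = k + 4 := ⟨n - 4, by omega⟩
      set u := s.take (k + 1) with hu
      set v := s.drop (k + 1) with hv
      have hulen : u.length = k + 1 := by simp [hu, hs]
      have hvlen : v.length = 3 := by simp [hv, hs]
      have hsplit : s = u ++ v := (List.take_append_drop (k + 1) s).symm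
      -- unfold the first four iterations
      have hrange : PySem.List.pyRange ((k + 4 : Nat) : Int) 0 (-1)
          = ((k : Int) + 4) :: ((k : Int) + 3) :: ((k : Int) + 2) :: ((k : Int) + 1)
            :: PySem.List.pyRange (k : Int) 0 (-1) := by
        rw [PySem.List.pyRange_neg_one_cons (by push_cast; omega)]
        push_cast
        rw [show ((k : Int) + 4 - 1) = ((k : Int) + 3) by ring]
        rw [PySem.List.pyRange_neg_one_cons (by omega)]
        rw [show ((k : Int) + 3 - 1) = ((k : Int) + 2) by ring]
        rw [PySem.List.pyRange_neg_one_cons (by omega)]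
        rw [show ((k : Int) + 2 - 1) = ((k : Int) + 1) by ring]
        rw [PySem.List.pyRange_neg_one_cons (by omega)]
        rw [show ((k : Int) + 1 - 1) = (k : Int) by ring]
      have hbump : ∀ (w : List Char) (c : Int) (i : Int), ¬ c > 2 →
          pvCommaStep (w, c) i = (w, c + 1) := by
        intro w c i hc; unfold pvCommaStep; simp [hc]
      have hins : pvCommaStep (s, 3) ((k : Int) + 1) = (u ++ ',' :: v, (0 : Int) + 1) := by
        have h1 : PySem.List.slice s none (some ((k : Int) + 1)) = u := by
          rw [show ((k : Int) + 1) = ((k + 1 : Nat) : Int) from by push_cast; ring,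
            PySem.List.slice_to_natCast]
        have h2 : PySem.List.slice s (some ((k : Int) + 1)) none = v := by
          rw [show ((k : Int) + 1) = ((k + 1 : Nat) : Int) from by push_cast; ring,
            PySem.List.slice_from_natCast]
        unfold pvCommaStep
        simp [h1, h2]
      rw [hs, hrange]
      simp only [List.foldl_cons]
      rw [hbump s 0 _ (by omega), hbump s (0 + 1) _ (by omega), hbump s (0 + 1 + 1) _ (by omega)]
      rw [show (0 : Int) + 1 + 1 + 1 = 3 by ring, hins]
      have hframe := pv_frame k u (',' :: v) ((0 : Int) + 1) (by omega)
      rw [hframe]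
      -- the fresh run on u: its first iteration is a pure counter bump
      have hfresh : ((PySem.List.pyRange (u.length : Int) 0 (-1)).foldl pvCommaStep (u, 0)).1
          = ((PySem.List.pyRange (k : Int) 0 (-1)).foldl pvCommaStep (u, (0 : Int) + 1)).1 := by
        rw [hulen]
        rw [PySem.List.pyRange_neg_one_cons (by push_cast; omega)]
        push_cast
        rw [show ((k : Int) + 1 - 1) = (k : Int) by ring]
        simp only [List.foldl_cons]
        rw [hbump u 0 _ (by omega)]
        norm_num
      have hihu' : ((PySem.List.pyRange (k : Int) 0 (-1)).foldl pvCommaStep (u, (0 : Int) + 1)).1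
          = (pvGrpRev u.reverse).reverse := hfresh.symm.trans (ih (k + 1) (by omega) u hulen)
      rw [hihu']
      -- right-hand side: peel one group of three off the reversed list
      obtain ⟨x, y, z, hxyz⟩ := List.length_eq_three.mp hvlen
      obtain ⟨d, r, hdr⟩ : ∃ d r, u.reverse = d :: r := by
        cases hur : u.reverse with
        | nil => exfalso; have hlen := congrArg List.length hur; simp [hulen] at hlen
        | cons d r => exact ⟨d, r, rfl⟩
      have hrev : s.reverse = z :: y :: x :: d :: r := by
        rw [hsplit, List.reverse_append, hxyz, hdr]; rfl
      have hgr : pvGrpRev s.reverse = z :: y :: x :: ',' :: pvGrpRev (d :: r) := by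
        rw [hrev]; rfl
      rw [hgr, ← hdr]
      simp [hxyz]

theorem pv_no_dash (m : Int) (h : 0 ≤ m) : '-' ∉ PySem.Int.toChars m := by
  unfold PySem.Int.toChars
  rw [if_neg (by omega)]
  intro hmem
  have := Nat.isDigit_of_mem_toDigits (by norm_num : 0 < 10) (by norm_num : 10 ≤ 10) hmem
  simp [Char.isDigit] at this

-- A's helper agrees with format(n, ',') for nonnegative n
theorem pv_int_eq (m : Int) (h : 0 ≤ m) : get_intToSTR m = pvFmtComma m := by
  unfold get_intToSTR pvFmtComma
  have hnd := pv_no_dash m h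
  rw [if_neg (by omega : ¬ m < 0), if_neg hnd]
  rw [pv_strip_noop _ _ hnd]
  rw [pv_comma_eq (PySem.Int.toChars m).length _ rfl]
  rw [Int.natAbs_of_nonneg h]
  simp

-- folding '++' from [] is flattening the mapped list
theorem pv_foldl_flatten {α β : Type} (g : α → List β) (l : List α) :
    ∀ acc : List β, l.foldl (fun text pay => text ++ g pay) acc = acc ++ (l.map g).flatten := by
  induction l with
  | nil => intro acc; simp
  | cons p l ih => intro acc; simp [ih]

-- ===== VERDICT (by name: the statement is the Claim_ definition above) =====
theorem get_all_payments_spec : Claim_equal_get_all_payments := by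
  intro payments lang _hdom hpre
  unfold Spec_get_all_payments get_all_payments get_all_payments_alt
  cases payments with
  | nil => rfl
  | cons p ps =>
    simp only [List.length_cons, Nat.succ_ne_zero, reduceCtorEq]
    rw [if_neg (by simp), if_neg (by simp)]
    congr 1
    rw [pv_foldl_flatten]
    simp only [List.nil_append]
    congr 1
    apply List.map_congr_left
    intro pay hmem
    rw [pv_int_eq pay.2 (hpre pay hmem)]
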